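-- pv_equiv track=rewrite | github.com/Maidervierte/mdrvrt_aoc | 2016/aoc07.py | check_ssl
-- ===== SOURCE A (Python) =====
-- def check_ssl(_ip):
--     """checks string for super-secret listening"""
--     aba = []
--     for i in range(len(_ip) - 2):
--         if _ip[i] == _ip[i + 2] and _ip[i] != _ip[i + 1]:
--             aba.append(i)
--     if len(aba) < 2:
--         return False
--     inside = []
--     outside = []
--     for index in aba:
--         _outside = True
--         for i in range(index, -1, -1):
--             if _ip[i] == "]":
--                 break
--             if _ip[i] == "[":
--                 for j in range(index, len(_ip)):
--                     if _ip[j] == "[":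
--                         break
--                     if _ip[j] == "]":
--                         inside.append(_ip[index:index + 3])
--                         _outside = False
--                         break
--                 break
--         if _outside:
--             outside.append(_ip[index:index + 3])
--     for xyx in inside:
--         for yxy in outside:
--             if xyx[0] == yxy[1] and yxy[2] == xyx[1]:
--                 return True
--     return False
-- ===== SOURCE B (Python) =====
-- def check_ssl(_ip):
--     """checks string for super-secret listening"""
--     n = len(_ip)
--     # nearest bracket char at position <= i (or '' if none), one left-to-right pass
--     last = []
--     cur = ''
--     for c in _ip:
--         if c == '[' or c == ']':
--             cur = c
--         last.append(cur)
--     # nearest bracket char at position >= i (or '' if none), one right-to-left pass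
--     nxt = [''] * n
--     cur = ''
--     for i in range(n - 1, -1, -1):
--         c = _ip[i]
--         if c == '[' or c == ']':
--             cur = c
--         nxt[i] = cur
--     inside = set()
--     outside = set()
--     for i in range(n - 2):
--         x, y = _ip[i], _ip[i + 1]
--         if x == _ip[i + 2] and x != y:
--             if last[i] == '[' and nxt[i] == ']':
--                 inside.add((x, y))
--             else:
--                 outside.add((x, y))
--     return any((y, x) in outside for (x, y) in inside)
-- ===== Notes on version B (the rewrite author's own statement) =====
-- stated objective: faster
-- what changed: Replaces the per-ABA backward/forward bracket scans and the quadratic inside-outside substring comparison with two O(n) passes precomputing the nearest bracket on each side of every position plus set lookups of (char,char) pairs.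
import Mathlib
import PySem

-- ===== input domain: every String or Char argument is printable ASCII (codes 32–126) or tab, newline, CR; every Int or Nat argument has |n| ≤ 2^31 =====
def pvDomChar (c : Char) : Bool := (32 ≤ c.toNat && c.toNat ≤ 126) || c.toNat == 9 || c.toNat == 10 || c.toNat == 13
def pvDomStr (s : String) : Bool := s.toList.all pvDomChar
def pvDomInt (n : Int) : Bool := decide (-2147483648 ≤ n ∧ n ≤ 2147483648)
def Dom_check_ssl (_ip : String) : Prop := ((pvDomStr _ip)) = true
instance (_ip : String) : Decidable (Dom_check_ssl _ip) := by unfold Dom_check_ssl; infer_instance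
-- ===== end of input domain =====

-- B replaces A's per-ABA quadratic backward/forward bracket scans and substring cross-product
-- with two linear precomputation passes (nearest bracket left/right of each position) and set
-- lookups of (char,char) pairs; objective: faster.

-- ===== PORT A =====
-- inner forward scan 'for j in range(index, len(_ip))' of A
def pvFwdA (s : List Char) (j : Nat) : Bool :=
  if _h : j < s.length then
    if s.getD j ' ' == '[' then false
    else if s.getD j ' ' == ']' then true
    else pvFwdA s (j + 1)
  else false
termination_by s.length - j

-- backward scan 'for i in range(index, -1, -1)' of A; returns true when classified inside
def pvBackA (s : List Char) (index : Nat) : Nat → Bool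
  | 0 =>
      if s.getD 0 ' ' == ']' then false
      else if s.getD 0 ' ' == '[' then pvFwdA s index
      else false
  | i + 1 =>
      if s.getD (i + 1) ' ' == ']' then false
      else if s.getD (i + 1) ' ' == '[' then pvFwdA s index
      else pvBackA s index i

def check_ssl (_ip : String) : Bool :=
  let s := _ip.toList
  let aba := (List.range (s.length - 2)).foldl
    (fun acc i =>
      if s.getD i ' ' == s.getD (i + 2) ' ' && !(s.getD i ' ' == s.getD (i + 1) ' ')
      then acc ++ [i] else acc) []
  if aba.length < 2 then false
  else
    let p := aba.foldl
      (fun (p : List (List Char) × List (List Char)) index =>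
        if pvBackA s index index then (p.1 ++ [(s.drop index).take 3], p.2)
        else (p.1, p.2 ++ [(s.drop index).take 3])) ([], [])
    p.1.any fun xyx => p.2.any fun yxy =>
      xyx.getD 0 ' ' == yxy.getD 1 ' ' && yxy.getD 2 ' ' == xyx.getD 1 ' '

-- ===== PORT B =====
-- left-to-right pass: nearest bracket char at position ≤ i (none = Python's '')
def pvLastBr (s : List Char) : List (Option Char) :=
  (s.foldl (fun (acc : List (Option Char) × Option Char) c =>
      let cur := if c == '[' || c == ']' then some c else acc.2
      (acc.1 ++ [cur], cur)) ([], none)).1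

-- right-to-left pass (Python's descending index loop): nearest bracket char at position ≥ i
def pvNxtBr (s : List Char) : List (Option Char) :=
  (s.foldr (fun c (acc : List (Option Char) × Option Char) =>
      let cur := if c == '[' || c == ']' then some c else acc.2
      (cur :: acc.1, cur)) ([], none)).1

def check_ssl_alt (_ip : String) : Bool :=
  let s := _ip.toList
  let last := pvLastBr s
  let nxt := pvNxtBr s
  let p := (List.range (s.length - 2)).foldl
    (fun (p : PySem.Set (Char × Char) × PySem.Set (Char × Char)) i =>
      let x := s.getD i ' '
      let y := s.getD (i + 1) ' '
      if x == s.getD (i + 2) ' ' && !(x == y) then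
        if last.getD i none == some '[' && nxt.getD i none == some ']' then
          (PySem.Set.add p.1 (x, y), p.2)
        else (p.1, PySem.Set.add p.2 (x, y))
      else p) (PySem.Set.empty, PySem.Set.empty)
  p.1.any fun q => PySem.Set.contains p.2 (q.2, q.1)

-- ===== PRECONDITION & SPEC =====
def Spec_check_ssl (_ip : String) (out : Bool) : Prop := out = check_ssl_alt _ip
instance (_ip : String) (out : Bool) : Decidable (Spec_check_ssl _ip out) := by unfold Spec_check_ssl; infer_instance

-- ===== CLAIM (what is proved, stated in full; the proofs are below) =====
def Claim_equal_check_ssl : Prop := ∀ (_ip : String), Dom_check_ssl _ip → Spec_check_ssl _ip (check_ssl _ip)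

-- ===== LEMMAS AND PROOFS =====

def pvIsBr (c : Char) : Bool := c == '[' || c == ']'
-- nearest bracket at position ≤ i / ≥ i
def pvLB (s : List Char) (i : Nat) : Option Char := ((s.take (i + 1)).filter pvIsBr).getLast?
def pvFB (s : List Char) (i : Nat) : Option Char := ((s.drop i).filter pvIsBr).head?
def pvAbaP (s : List Char) (i : Nat) : Bool :=
  s.getD i ' ' == s.getD (i + 2) ' ' && !(s.getD i ' ' == s.getD (i + 1) ' ')
def pvBrC (s : List Char) (i : Nat) : Bool := (pvLB s i == some '[') && (pvFB s i == some ']')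
def pvAba (s : List Char) : List Nat := (List.range (s.length - 2)).filter (pvAbaP s)
def pvCondB (s : List Char) (i : Nat) : Bool :=
  (pvLastBr s).getD i none == some '[' && (pvNxtBr s).getD i none == some ']'
def pvPr (s : List Char) (i : Nat) : Char × Char := (s.getD i ' ', s.getD (i + 1) ' ')

def pvBodyA (s : List Char) : Bool :=
  let aba := (List.range (s.length - 2)).foldl
    (fun acc i =>
      if s.getD i ' ' == s.getD (i + 2) ' ' && !(s.getD i ' ' == s.getD (i + 1) ' ')
      then acc ++ [i] else acc) []
  if aba.length < 2 then false
  else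
    let p := aba.foldl
      (fun (p : List (List Char) × List (List Char)) index =>
        if pvBackA s index index then (p.1 ++ [(s.drop index).take 3], p.2)
        else (p.1, p.2 ++ [(s.drop index).take 3])) ([], [])
    p.1.any fun xyx => p.2.any fun yxy =>
      xyx.getD 0 ' ' == yxy.getD 1 ' ' && yxy.getD 2 ' ' == xyx.getD 1 ' '

def pvBodyB (s : List Char) : Bool :=
  let p := (List.range (s.length - 2)).foldl
    (fun (p : PySem.Set (Char × Char) × PySem.Set (Char × Char)) i =>
      let x := s.getD i ' '
      let y := s.getD (i + 1) ' '
      if x == s.getD (i + 2) ' ' && !(x == y) then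
        if (pvLastBr s).getD i none == some '[' && (pvNxtBr s).getD i none == some ']' then
          (PySem.Set.add p.1 (x, y), p.2)
        else (p.1, PySem.Set.add p.2 (x, y))
      else p) (PySem.Set.empty, PySem.Set.empty)
  p.1.any fun q => PySem.Set.contains p.2 (q.2, q.1)

theorem bodyA_eq (ip : String) : check_ssl ip = pvBodyA ip.toList := rfl
theorem bodyB_eq (ip : String) : check_ssl_alt ip = pvBodyB ip.toList := rfl

-- scan characterisations -------------------------------------------------

def pvScanL : List Char → Option Char → List (Option Char)
  | [], _ => []
  | c :: cs, cur =>
    let cur' := if c == '[' || c == ']' then some c else cur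
    cur' :: pvScanL cs cur'

def pvNscan : List Char → List (Option Char)
  | [] => []
  | c :: cs => ((c :: cs).filter pvIsBr).head? :: pvNscan cs

theorem getLast?_cons_or {α : Type} (a : α) (l : List α) :
    (a :: l).getLast? = l.getLast?.or (some a) := by
  cases l with
  | nil => simp
  | cons b t =>
    rw [List.getLast?_cons_cons]
    have h : (b :: t).getLast?.isSome := by simp [List.getLast?_isSome]
    cases hh : (b :: t).getLast? with
    | none => rw [hh] at h; simp at h
    | some x => simp

theorem pvFoldL_scan (s : List Char) :
    ∀ (acc : List (Option Char)) (cur : Option Char),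
    (s.foldl (fun (acc : List (Option Char) × Option Char) c =>
        let cur := if c == '[' || c == ']' then some c else acc.2
        (acc.1 ++ [cur], cur)) (acc, cur)).1 = acc ++ pvScanL s cur := by
  induction s with
  | nil => intro acc cur; simp [pvScanL]
  | cons c cs ih =>
    intro acc cur
    simp only [List.foldl_cons, pvScanL]
    rw [ih]
    simp

theorem pvLastBr_eq (s : List Char) : pvLastBr s = pvScanL s none := by
  unfold pvLastBr
  rw [pvFoldL_scan]
  simp

theorem pvScanL_getD (s : List Char) :
    ∀ (cur : Option Char) (i : Nat), i < s.length →
    (pvScanL s cur).getD i none = (pvLB s i).or cur := by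
  induction s with
  | nil => intro cur i hi; simp at hi
  | cons c cs ih =>
    intro cur i hi
    cases i with
    | zero =>
      simp only [pvScanL, pvLB, List.take_add_one, List.take_zero, List.nil_append,
        List.getElem?_cons_zero, Option.toList_some]
      by_cases h : pvIsBr c
      · simp [pvIsBr] at h
        simp [List.getD, h, pvIsBr]
      · simp [pvIsBr] at h
        simp [List.getD, h, pvIsBr]
    | succ i =>
      simp only [pvScanL, List.getD_cons_succ]
      rw [ih _ i (by simpa using hi)]
      unfold pvLB
      rw [List.take_succ_cons, List.filter_cons]
      by_cases h : pvIsBr c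
      · simp only [h, if_pos]
        rw [getLast?_cons_or]
        rw [Option.or_assoc]
        simp [pvIsBr] at h
        rcases h with h | h <;> simp [h]
      · have h' : ¬(c == '[' || c == ']') = true := by simpa [pvIsBr] using h
        simp [h, h']

theorem pvLastBr_getD (s : List Char) (i : Nat) (hi : i < s.length) :
    (pvLastBr s).getD i none = pvLB s i := by
  rw [pvLastBr_eq, pvScanL_getD s none i hi, Option.or_none]

theorem pvFoldR_scan (s : List Char) :
    s.foldr (fun c (acc : List (Option Char) × Option Char) =>
        let cur := if c == '[' || c == ']' then some c else acc.2
        (cur :: acc.1, cur)) ([], none) = (pvNscan s, (s.filter pvIsBr).head?) := by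
  induction s with
  | nil => simp [pvNscan]
  | cons c cs ih =>
    simp only [List.foldr_cons, ih, pvNscan, List.filter_cons]
    by_cases h : pvIsBr c
    · have h' : (c == '[' || c == ']') = true := by simpa [pvIsBr] using h
      simp [h, h']
    · have h' : ¬(c == '[' || c == ']') = true := by simpa [pvIsBr] using h
      simp [h, h']

theorem pvNscan_getD (s : List Char) :
    ∀ (i : Nat), i < s.length → (pvNscan s).getD i none = pvFB s i := by
  induction s with
  | nil => intro i hi; simp at hi
  | cons c cs ih =>
    intro i hi
    cases i with
    | zero => simp [pvNscan, pvFB, List.getD]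
    | succ i =>
      simp only [pvNscan, List.getD_cons_succ, pvFB, List.drop_succ_cons]
      exact ih i (by simpa using hi)

theorem pvNxtBr_getD (s : List Char) (i : Nat) (hi : i < s.length) :
    (pvNxtBr s).getD i none = pvFB s i := by
  unfold pvNxtBr
  rw [pvFoldR_scan]
  exact pvNscan_getD s i hi

theorem pvCondB_eq (s : List Char) (i : Nat) (hi : i < s.length) :
    pvCondB s i = pvBrC s i := by
  unfold pvCondB pvBrC
  rw [pvLastBr_getD s i hi, pvNxtBr_getD s i hi]

-- A's scans compute pvBrC -------------------------------------------------

theorem pvFwdA_eq (s : List Char) : ∀ (j : Nat), pvFwdA s j = (pvFB s j == some ']') := by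
  intro j
  induction hk : s.length - j using Nat.strong_induction_on generalizing j with
  | _ k ih =>
    unfold pvFwdA
    by_cases hj : j < s.length
    · have hdrop : s.drop j = s[j] :: s.drop (j + 1) := List.drop_eq_getElem_cons hj
      have hget : s.getD j ' ' = s[j] := List.getD_eq_getElem s ' ' hj
      simp only [hj, dif_pos, hget]
      by_cases h1 : s[j] = '['
      · simp [pvFB, hdrop, h1, pvIsBr]
      · by_cases h2 : s[j] = ']'
        · simp [pvFB, hdrop, h2, pvIsBr]
        · have hrec : pvFwdA s (j + 1) = (pvFB s (j + 1) == some ']') := by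
            have hlt : s.length - (j + 1) < k := by omega
            exact ih _ hlt (j + 1) rfl
          have hfb : pvFB s j = pvFB s (j + 1) := by
            unfold pvFB
            rw [hdrop, List.filter_cons]
            have hb : pvIsBr s[j] = false := by simp [pvIsBr, h1, h2]
            rw [hb]
            simp
          have e1 : (s[j] == '[') = false := by simp [h1]
          have e2 : (s[j] == ']') = false := by simp [h2]
          rw [e1, e2]
          simp only [Bool.false_eq_true, if_false]
          rw [hrec, hfb]
    · have hdrop : s.drop j = [] := List.drop_eq_nil_of_le (by omega)
      simp [hj, pvFB, hdrop]

theorem pvBackA_eq (s : List Char) (index : Nat) :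
    ∀ (i : Nat), i < s.length →
    pvBackA s index i = ((pvLB s i == some '[') && pvFwdA s index) := by
  intro i
  induction i with
  | zero =>
    intro hi
    have hget : s.getD 0 ' ' = s[0] := List.getD_eq_getElem s ' ' hi
    have htake : s.take 1 = [s[0]] := by
      rw [List.take_add_one]
      simp [List.getElem?_eq_getElem hi]
    unfold pvBackA
    rw [hget]
    unfold pvLB
    rw [htake]
    by_cases h2 : s[0] = ']'
    · simp [h2, pvIsBr]
    · by_cases h1 : s[0] = '['
      · simp [h1, pvIsBr]
      · simp [h1, h2, pvIsBr]
  | succ i ih =>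
    intro hi
    have hget : s.getD (i + 1) ' ' = s[i + 1] := List.getD_eq_getElem s ' ' hi
    have htake : (s.take (i + 2)).filter pvIsBr
        = (s.take (i + 1)).filter pvIsBr ++ (if pvIsBr s[i + 1] then [s[i + 1]] else []) := by
      rw [List.take_add_one, List.getElem?_eq_getElem hi, List.filter_append]
      simp [List.filter_cons]
    unfold pvBackA
    rw [hget]
    unfold pvLB
    rw [htake]
    by_cases h2 : s[i + 1] = ']'
    · simp [h2, pvIsBr]
    · by_cases h1 : s[i + 1] = '['
      · simp [h1, pvIsBr]
      · have : pvIsBr s[i + 1] = false := by simp [pvIsBr, h1, h2]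
        rw [this]
        simp only [if_neg (by simp : ¬False), Bool.false_eq_true]
        rw [ih (by omega)]
        simp [pvLB, h1, h2]

theorem pvBackA_brC (s : List Char) (i : Nat) (hi : i < s.length) :
    pvBackA s i i = pvBrC s i := by
  rw [pvBackA_eq s i i hi, pvFwdA_eq]
  rfl

-- fold shapes --------------------------------------------------------------

theorem foldl_app_if (p : Nat → Bool) :
    ∀ (l : List Nat) (acc : List Nat),
    l.foldl (fun acc i => if p i then acc ++ [i] else acc) acc = acc ++ l.filter p := by
  intro l
  induction l with
  | nil => simp
  | cons a t ih =>
    intro acc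
    simp only [List.foldl_cons, List.filter_cons]
    by_cases h : p a
    · rw [if_pos h, ih, if_pos h]; simp
    · rw [if_neg h, ih, if_neg (by simp [h])]

theorem foldl_partA (s : List Char) :
    ∀ (l : List Nat) (a1 a2 : List (List Char)),
    l.foldl (fun (p : List (List Char) × List (List Char)) index =>
        if pvBackA s index index then (p.1 ++ [(s.drop index).take 3], p.2)
        else (p.1, p.2 ++ [(s.drop index).take 3])) (a1, a2)
    = (a1 ++ (l.filter (fun i => pvBackA s i i)).map (fun i => (s.drop i).take 3),
       a2 ++ (l.filter (fun i => !pvBackA s i i)).map (fun i => (s.drop i).take 3)) := by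
  intro l
  induction l with
  | nil => simp
  | cons a t ih =>
    intro a1 a2
    simp only [List.foldl_cons, List.filter_cons]
    by_cases h : pvBackA s a a
    · rw [if_pos h, ih]
      simp [h]
    · rw [if_neg h, ih]
      simp [h]

theorem foldl_partB (s : List Char) :
    ∀ (l : List Nat) (t1 t2 : PySem.Set (Char × Char)),
    l.foldl (fun (p : PySem.Set (Char × Char) × PySem.Set (Char × Char)) i =>
        let x := s.getD i ' '
        let y := s.getD (i + 1) ' '
        if x == s.getD (i + 2) ' ' && !(x == y) then
          if (pvLastBr s).getD i none == some '[' && (pvNxtBr s).getD i none == some ']' then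
            (PySem.Set.add p.1 (x, y), p.2)
          else (p.1, PySem.Set.add p.2 (x, y))
        else p) (t1, t2)
    = (PySem.Set.update t1 ((l.filter (fun i => pvAbaP s i && pvCondB s i)).map (pvPr s)),
       PySem.Set.update t2 ((l.filter (fun i => pvAbaP s i && !pvCondB s i)).map (pvPr s))) := by
  intro l
  induction l with
  | nil => intro t1 t2; simp [PySem.Set.update_nil]
  | cons a t ih =>
    intro t1 t2
    simp only [List.foldl_cons, List.filter_cons]
    by_cases ha : pvAbaP s a
    · by_cases hc : pvCondB s a
      · have h1 : (pvAbaP s a && pvCondB s a) = true := by simp [ha, hc]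
        have h2 : (pvAbaP s a && !pvCondB s a) = false := by simp [hc]
        rw [h1, h2]
        simp only [if_pos]
        have e1 : (s.getD a ' ' == s.getD (a + 2) ' ' && !(s.getD a ' ' == s.getD (a + 1) ' ')) = true := ha
        have e2 : ((pvLastBr s).getD a none == some '[' && (pvNxtBr s).getD a none == some ']') = true := hc
        simp only [e1, e2, if_pos, List.map_cons]
        rw [ih]
        simp [PySem.Set.update_cons, pvPr]
      · have h1 : (pvAbaP s a && pvCondB s a) = false := by simp [hc]
        have h2 : (pvAbaP s a && !pvCondB s a) = true := by simp [ha, hc]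
        rw [h1, h2]
        have e1 : (s.getD a ' ' == s.getD (a + 2) ' ' && !(s.getD a ' ' == s.getD (a + 1) ' ')) = true := ha
        have e2 : ((pvLastBr s).getD a none == some '[' && (pvNxtBr s).getD a none == some ']') = false := by
          simpa [pvCondB] using hc
        simp only [e1, e2, if_pos, Bool.false_eq_true, List.map_cons]
        rw [ih]
        simp [PySem.Set.update_cons, pvPr]
    · have h1 : (pvAbaP s a && pvCondB s a) = false := by simp [ha]
      have h2 : (pvAbaP s a && !pvCondB s a) = false := by simp [ha]
      rw [h1, h2]
      have e1 : (s.getD a ' ' == s.getD (a + 2) ' ' && !(s.getD a ' ' == s.getD (a + 1) ' ')) = false := by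
        simpa [pvAbaP] using ha
      simp only [e1, Bool.false_eq_true]
      exact ih t1 t2

theorem sub3_getD (s : List Char) (i k : Nat) (hk : k < 3) (_h : i + 2 < s.length) :
    ((s.drop i).take 3).getD k ' ' = s.getD (i + k) ' ' := by
  rw [List.getD_eq_getElem?_getD, List.getD_eq_getElem?_getD]
  rw [List.getElem?_take]
  simp [hk, List.getElem?_drop]

theorem mem_aba (s : List Char) (i : Nat) (hi : i ∈ pvAba s) :
    i + 2 < s.length ∧ pvAbaP s i = true := by
  unfold pvAba at hi
  rw [List.mem_filter, List.mem_range] at hi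
  obtain ⟨h1, h2⟩ := hi
  exact ⟨by omega, h2⟩

theorem two_le_len {l : List Nat} {i j : Nat} (hi : i ∈ l) (hj : j ∈ l) (hne : i ≠ j) :
    2 ≤ l.length := by
  match l with
  | [] => cases hi
  | [a] => simp at hi hj; omega
  | a :: b :: t => simp [List.length]

-- the two existential normal forms ----------------------------------------

theorem A_iff (s : List Char) :
    pvBodyA s = true ↔
    ∃ i j, i ∈ pvAba s ∧ j ∈ pvAba s ∧ pvBrC s i = true ∧ pvBrC s j = false ∧
      s.getD i ' ' = s.getD (j + 1) ' ' ∧ s.getD (j + 2) ' ' = s.getD (i + 1) ' ' := by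
  unfold pvBodyA
  rw [foldl_app_if (fun i => s.getD i ' ' == s.getD (i + 2) ' ' && !(s.getD i ' ' == s.getD (i + 1) ' ')) _ []]
  simp only [List.nil_append]
  have haba : (List.range (s.length - 2)).filter
      (fun i => s.getD i ' ' == s.getD (i + 2) ' ' && !(s.getD i ' ' == s.getD (i + 1) ' ')) = pvAba s := rfl
  rw [haba]
  by_cases hlen : (pvAba s).length < 2
  · rw [if_pos hlen]
    constructor
    · intro h; cases h
    · rintro ⟨i, j, hi, hj, hbi, hbj, -, -⟩
      have hne : i ≠ j := fun h => by rw [h, hbj] at hbi; cases hbi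
      have := two_le_len hi hj hne
      omega
  · rw [if_neg hlen, foldl_partA]
    simp only [List.nil_append, List.any_eq_true, List.mem_map, List.mem_filter]
    constructor
    · rintro ⟨xyx, ⟨i, ⟨hi, hqi⟩, rfl⟩, yxy, ⟨j, ⟨hj, hqj⟩, rfl⟩, hc⟩
      obtain ⟨hi2, -⟩ := mem_aba s i hi
      obtain ⟨hj2, -⟩ := mem_aba s j hj
      rw [sub3_getD s i 0 (by omega) hi2, sub3_getD s j 1 (by omega) hj2,
        sub3_getD s j 2 (by omega) hj2, sub3_getD s i 1 (by omega) hi2] at hc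
      rw [Bool.and_eq_true, beq_iff_eq, beq_iff_eq] at hc
      refine ⟨i, j, hi, hj, ?_, ?_, by simpa using hc.1, by simpa using hc.2⟩
      · rw [← pvBackA_brC s i (by omega)]; exact hqi
      · rw [← pvBackA_brC s j (by omega)]; simpa using hqj
    · rintro ⟨i, j, hi, hj, hbi, hbj, hc1, hc2⟩
      obtain ⟨hi2, -⟩ := mem_aba s i hi
      obtain ⟨hj2, -⟩ := mem_aba s j hj
      refine ⟨(s.drop i).take 3, ⟨i, ⟨hi, ?_⟩, rfl⟩, (s.drop j).take 3, ⟨j, ⟨hj, ?_⟩, rfl⟩, ?_⟩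
      · rw [pvBackA_brC s i (by omega)]; exact hbi
      · rw [pvBackA_brC s j (by omega), hbj]; rfl
      · rw [sub3_getD s i 0 (by omega) hi2, sub3_getD s j 1 (by omega) hj2,
          sub3_getD s j 2 (by omega) hj2, sub3_getD s i 1 (by omega) hi2]
        simp only [List.getD_eq_getElem?_getD] at hc1 hc2 ⊢
        simp [hc1, hc2]

theorem B_iff (s : List Char) :
    pvBodyB s = true ↔
    ∃ i j, i ∈ pvAba s ∧ j ∈ pvAba s ∧ pvBrC s i = true ∧ pvBrC s j = false ∧
      s.getD j ' ' = s.getD (i + 1) ' ' ∧ s.getD (j + 1) ' ' = s.getD i ' ' := by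
  unfold pvBodyB
  rw [foldl_partB]
  simp only [List.any_eq_true, PySem.Set.contains_iff, PySem.Set.mem_update, PySem.Set.empty,
    List.not_mem_nil, false_or, List.mem_map, List.mem_filter, List.mem_range, Bool.and_eq_true]
  constructor
  · rintro ⟨q, ⟨i, ⟨hir, hai, hci⟩, rfl⟩, j, ⟨hjr, haj, hcj⟩, hqj⟩
    have hiA : i ∈ pvAba s := by
      unfold pvAba; rw [List.mem_filter, List.mem_range]; exact ⟨hir, hai⟩
    have hjA : j ∈ pvAba s := by
      unfold pvAba; rw [List.mem_filter, List.mem_range]; exact ⟨hjr, haj⟩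
    refine ⟨i, j, hiA, hjA, ?_, ?_, ?_, ?_⟩
    · rw [← pvCondB_eq s i (by omega)]; exact hci
    · rw [← pvCondB_eq s j (by omega)]; simpa using hcj
    · simpa [pvPr] using congrArg Prod.fst hqj
    · simpa [pvPr] using congrArg Prod.snd hqj
  · rintro ⟨i, j, hi, hj, hbi, hbj, hc1, hc2⟩
    have hi' := hi; have hj' := hj
    unfold pvAba at hi' hj'
    rw [List.mem_filter, List.mem_range] at hi' hj'
    refine ⟨pvPr s i, ⟨i, ⟨hi'.1, hi'.2, ?_⟩, rfl⟩, j, ⟨hj'.1, hj'.2, ?_⟩, ?_⟩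
    · rw [pvCondB_eq s i (by omega)]; exact hbi
    · rw [pvCondB_eq s j (by omega), hbj]; rfl
    · simp only [List.getD_eq_getElem?_getD] at hc1 hc2
      simp [pvPr, hc1, hc2]

theorem core (s : List Char) : pvBodyA s = pvBodyB s := by
  rw [Bool.eq_iff_iff, A_iff, B_iff]
  constructor
  · rintro ⟨i, j, hi, hj, hbi, hbj, hc1, hc2⟩
    obtain ⟨-, hai⟩ := mem_aba s i hi
    obtain ⟨-, haj⟩ := mem_aba s j hj
    rw [pvAbaP, Bool.and_eq_true, beq_iff_eq] at haj
    refine ⟨i, j, hi, hj, hbi, hbj, ?_, ?_⟩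
    · rw [haj.1, hc2]
    · rw [hc1]
  · rintro ⟨i, j, hi, hj, hbi, hbj, hc1, hc2⟩
    obtain ⟨-, hai⟩ := mem_aba s i hi
    obtain ⟨-, haj⟩ := mem_aba s j hj
    rw [pvAbaP, Bool.and_eq_true, beq_iff_eq] at haj
    refine ⟨i, j, hi, hj, hbi, hbj, ?_, ?_⟩
    · rw [hc2]
    · rw [← haj.1, hc1]

-- ===== VERDICT (by name: the statement is the Claim_ definition above) =====
theorem check_ssl_spec : Claim_equal_check_ssl := by
  intro ip _
  unfold Spec_check_ssl
  rw [bodyA_eq, bodyB_eq]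
  exact core ip.toList
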